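-- pv_equiv track=rewrite | github.com/chocoball604/projectbrainstormxyz | artifacts/brainstorm/db_compat.py | _translate_placeholders
-- ===== SOURCE A (Python) =====
-- def _translate_placeholders(sql: str) -> str:
--     """Translate SQLite-style SQL to a psycopg-safe parameter template.
--
--     Two passes:
--       1. Double every literal ``%`` (anywhere, including inside string
--          literals like ``'%foo%'``). psycopg parses ``%`` as a parameter
--          marker and will raise ``ProgrammingError`` on stray percents
--          even inside quoted literals -- so they must be escaped.
--       2. Replace ``?`` with ``%s`` *outside* of string literals (so
--          that ``WHERE name = '?'`` is left intact).
--
--     The doubled ``%%`` is collapsed back to ``%`` by psycopg before the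
--     SQL is sent to the server, so ``LIKE '%foo%'`` round-trips correctly.
--     """
--     # Pass 1: escape every % so psycopg won't parse it.
--     sql = sql.replace('%', '%%')
--
--     # Pass 2: replace ? with %s outside string literals.
--     out: list[str] = []
--     i = 0
--     n = len(sql)
--     in_str: str | None = None
--     while i < n:
--         c = sql[i]
--         if in_str is not None:
--             out.append(c)
--             if c == in_str:
--                 # SQL escapes a quote by doubling it.
--                 if i + 1 < n and sql[i + 1] == c:
--                     out.append(sql[i + 1])
--                     i += 2
--                     continue
--                 in_str = None
--             i += 1
--             continue
--         if c in ("'", '"'):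
--             in_str = c
--             out.append(c)
--             i += 1
--             continue
--         if c == '?':
--             out.append('%s')
--             i += 1
--             continue
--         out.append(c)
--         i += 1
--     return ''.join(out)
-- ===== SOURCE B (Python) =====
-- def _take_literal(q, s):
--     """Given text s after an opening quote q, split it into the literal body
--     (through the closing quote, keeping doubled-quote escapes) and the rest."""
--     taken = []
--     while True:
--         e = s.find(q)
--         if e == -1:
--             taken.append(s)
--             return ''.join(taken), ''
--         if e + 1 < len(s) and s[e + 1] == q:
--             taken.append(s[:e + 2])
--             s = s[e + 2:]
--         else:
--             return ''.join(taken) + s[:e + 1], s[e + 1:]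
--
--
-- def _translate_placeholders(sql: str) -> str:
--     """Chunk-based rewrite: cut the SQL into quote-free segments and string
--     literals with str.find, then fix each whole chunk with str.replace
--     (%->%% everywhere, ?->%s only in the quote-free chunks)."""
--     out = []
--     rest = sql
--     while True:
--         a = rest.find("'")
--         b = rest.find('"')
--         if a == -1:
--             j = b
--         elif b == -1:
--             j = a
--         else:
--             j = min(a, b)
--         if j == -1:
--             out.append(rest.replace('%', '%%').replace('?', '%s'))
--             return ''.join(out)
--         out.append(rest[:j].replace('%', '%%').replace('?', '%s'))
--         q = rest[j]
--         lit, rest = _take_literal(q, rest[j + 1:])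
--         out.append((q + lit).replace('%', '%%'))
-- ===== Notes on version B (the rewrite author's own statement) =====
-- stated objective: faster
-- what changed: B replaces A's %-doubling .replace pre-pass plus per-character quote-state scan with a chunk-cutting strategy: it locates string literals in the original SQL with str.find (honoring doubled-quote escapes) and rewrites each whole chunk with str.replace (%->%% everywhere, ?->%s only in the quote-free chunks), keeping no per-character state machine.
import Mathlib
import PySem

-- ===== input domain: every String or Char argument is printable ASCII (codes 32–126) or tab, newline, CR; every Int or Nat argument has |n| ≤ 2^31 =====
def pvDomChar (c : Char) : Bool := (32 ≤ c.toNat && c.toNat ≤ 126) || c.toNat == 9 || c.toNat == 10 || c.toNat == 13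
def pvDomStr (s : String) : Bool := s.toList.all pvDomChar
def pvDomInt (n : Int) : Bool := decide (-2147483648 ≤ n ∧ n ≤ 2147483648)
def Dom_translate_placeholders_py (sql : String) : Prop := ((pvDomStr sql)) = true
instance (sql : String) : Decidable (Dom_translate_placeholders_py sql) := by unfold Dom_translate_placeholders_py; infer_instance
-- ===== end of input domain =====

-- B replaces A's two-pass per-character state machine (a %-doubling .replace pre-pass, then a
-- quote-tracking scan) with a chunk-cutting strategy: it locates string literals with find and
-- rewrites each whole chunk with replace; same return value, a different decomposition.

-- ===== PORT A =====
-- A's pass 2: the while-loop over the %-escaped string; in_str is the Option Char state,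
-- the i += 2 branch consumes two chars (the nested match on the tail is the i+1 peek).
def pyAScan : Option Char → List Char → List Char
  | _, [] => []
  | some q, c :: rest =>
      if c = q then
        match rest with
        | c2 :: rest2 =>
            if c2 = c then c :: c2 :: pyAScan (some q) rest2
            else c :: pyAScan none (c2 :: rest2)
        | [] => c :: pyAScan none []
      else c :: pyAScan (some q) rest
  | none, c :: rest =>
      if c = '\'' ∨ c = '"' then c :: pyAScan (some c) rest
      else if c = '?' then '%' :: 's' :: pyAScan none rest
      else c :: pyAScan none rest
termination_by st l => l.length
decreasing_by all_goals (first | omega | (simp [List.length_cons]; omega) | simp)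

def translate_placeholders_py (sql : String) : String :=
  -- Pass 1: sql = sql.replace('%', '%%')
  let escaped := PySem.Str.replace sql "%" "%%"
  -- Pass 2: the scan
  String.ofList (pyAScan none escaped.toList)

-- ===== PORT B =====
-- B's per-chunk rewrite: chunk.replace('%','%%').replace('?','%s')
def pvEscOut (t : List Char) : List Char :=
  PySem.Chars.replace (PySem.Chars.replace t ['%'] ['%', '%']) ['?'] ['%', 's']

-- bounds of a successful single-char find (cited by the termination proofs of the B port)
theorem pvFind_bounds (s : List Char) (q : Char) (h : ¬ PySem.Chars.find s [q] = -1) :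
    0 ≤ PySem.Chars.find s [q] ∧ (PySem.Chars.find s [q]).toNat < s.length := by
  have h0 : -1 ≤ PySem.Chars.find s [q] := PySem.Chars.neg_one_le_find s [q]
  have hge : 0 ≤ PySem.Chars.find s [q] := by omega
  have hpre := (PySem.Chars.find_spec (s := s) (sub := [q]) hge).1
  refine ⟨hge, ?_⟩
  rcases hpre with ⟨r, hr⟩
  have hlen : (s.drop (PySem.Chars.find s [q]).toNat).length = r.length + 1 := by
    rw [← hr]; simp
  simp only [List.length_drop] at hlen
  omega

-- Source B's _take_literal: while-loop transcribed as recursion on the shrinking suffix s;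
-- 'e + 1 < len(s) and s[e+1] == q' is the getElem? test (some q exactly when in range and equal)
def pvTakeLiteral (q : Char) (s : List Char) : List Char × List Char :=
  let e := PySem.Chars.find s [q]
  if he : e = -1 then (s, [])
  else if s[e.toNat + 1]? = some q then
    let p := pvTakeLiteral q (s.drop (e.toNat + 2))
    (s.take (e.toNat + 2) ++ p.1, p.2)
  else (s.take (e.toNat + 1), s.drop (e.toNat + 1))
termination_by s.length
decreasing_by
  have := pvFind_bounds s q he
  simp only [List.length_drop]
  omega

theorem pvTakeLiteral_rest_le (q : Char) (s : List Char) :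
    (pvTakeLiteral q s).2.length ≤ s.length := by
  fun_induction pvTakeLiteral q s
  case case1 => simp
  case case2 s he hpk ih =>
      refine le_trans ih ?_
      simp only [List.length_drop]
      omega
  case case3 => simp

-- Source B's first-quote computation: a = rest.find("'"); b = rest.find('"'); j as in Source B
def pvQuotePos (s : List Char) : Int :=
  let a := PySem.Chars.find s ['\'']
  let b := PySem.Chars.find s ['"']
  if a = -1 then b else if b = -1 then a else min a b

theorem pvQuotePos_bounds (s : List Char) (h : ¬ pvQuotePos s = -1) :
    0 ≤ pvQuotePos s ∧ (pvQuotePos s).toNat < s.length := by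
  unfold pvQuotePos at *
  by_cases ha : PySem.Chars.find s ['\''] = -1 <;>
    by_cases hb : PySem.Chars.find s ['"'] = -1
  · simp [ha, hb] at h
  · simpa [ha, hb] using pvFind_bounds s '"' hb
  · simpa [ha, hb] using pvFind_bounds s '\'' ha
  · have h1 := pvFind_bounds s '\'' ha
    have h2 := pvFind_bounds s '"' hb
    rw [if_neg ha, if_neg hb]
    refine ⟨le_min h1.1 h2.1, ?_⟩
    rcases min_cases (PySem.Chars.find s ['\'']) (PySem.Chars.find s ['"']) with ⟨hm, _⟩ | ⟨hm, _⟩ <;>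
      rw [hm] <;> omega

-- Source B's outer while-loop, transcribed as recursion on the shrinking rest
def bMain (s : List Char) : List Char :=
  let j := pvQuotePos s
  if hj : j = -1 then pvEscOut s
  else
    match PySem.List.pyGet? s j with
    | none => pvEscOut s   -- unreachable: j is an in-range found index (rest[j] in Source B)
    | some q =>
      let p := pvTakeLiteral q (s.drop (j.toNat + 1))
      pvEscOut (s.take j.toNat) ++ PySem.Chars.replace (q :: p.1) ['%'] ['%', '%'] ++ bMain p.2
termination_by s.length
decreasing_by
  have h1 := pvQuotePos_bounds s hj
  have h2 := pvTakeLiteral_rest_le q (s.drop ((pvQuotePos s).toNat + 1))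
  simp only [List.length_drop] at h2
  omega

def translate_placeholders_py_alt (sql : String) : String :=
  String.ofList (bMain sql.toList)

-- ===== PRECONDITION & SPEC =====
def Spec_translate_placeholders_py (sql : String) (out : String) : Prop := out = translate_placeholders_py_alt sql
instance (sql : String) (out : String) : Decidable (Spec_translate_placeholders_py sql out) := by unfold Spec_translate_placeholders_py; infer_instance

-- ===== CLAIM (what is proved, stated in full; the proofs are below) =====
def Claim_equal_translate_placeholders_py : Prop := ∀ (sql : String), Dom_translate_placeholders_py sql → Spec_translate_placeholders_py sql (translate_placeholders_py sql)

-- ===== LEMMAS AND PROOFS =====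

-- single-char substitution: the effect of replace l [a] r
def pvSub (a : Char) (r : List Char) (l : List Char) : List Char :=
  l.flatMap (fun c => if c = a then r else [c])

theorem pvReplaceGo_eq_sub (a : Char) (r : List Char) :
    ∀ (fuel : Nat) (l acc : List Char), l.length ≤ fuel →
      PySem.Chars.replace.go [a] r fuel l acc = acc.reverse ++ pvSub a r l := by
  intro fuel
  induction fuel with
  | zero =>
      intro l acc h
      have : l = [] := List.length_eq_zero_iff.mp (Nat.le_zero.mp h)
      subst this
      simp [PySem.Chars.replace.go, pvSub]
  | succ n ih =>
      intro l acc h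
      cases l with
      | nil => simp [PySem.Chars.replace.go, pvSub]
      | cons c t =>
          simp only [List.length_cons, Nat.succ_le_succ_iff] at h
          by_cases hc : c = a
          · subst hc
            rw [PySem.Chars.replace.go]
            simp only [List.isPrefixOf, BEq.rfl, Bool.true_and, List.isPrefixOf_nil_left, if_true,
              List.length_cons, List.length_nil, Nat.zero_add, List.drop_succ_cons, List.drop_zero]
            rw [ih t _ h]
            simp [pvSub]
          · rw [PySem.Chars.replace.go]
            have : List.isPrefixOf [a] (c :: t) = false := by
              simp only [List.isPrefixOf, Bool.and_eq_false_iff, beq_eq_false_iff_ne, ne_eq]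
              exact Or.inl fun hh => hc hh.symm
            simp only [this, Bool.false_eq_true, if_false]
            rw [ih t _ h]
            simp [pvSub, hc]

theorem pvReplace_eq_sub (a : Char) (r l : List Char) :
    PySem.Chars.replace l [a] r = pvSub a r l := by
  rw [PySem.Chars.replace]
  simp only [List.isEmpty_cons, Bool.false_eq_true, if_false]
  simpa using pvReplaceGo_eq_sub a r l.length l [] le_rfl

-- pass 1 of A / the %-escape of B's literal chunks
def pvExpand (l : List Char) : List Char := pvSub '%' ['%', '%'] l

-- the per-char effect of B's replace chain on a chunk
def pvEsc (l : List Char) : List Char :=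
  l.flatMap (fun c => if c = '%' then ['%', '%'] else if c = '?' then ['%', 's'] else [c])

theorem pvEscOut_eq (l : List Char) : pvEscOut l = pvEsc l := by
  unfold pvEscOut
  rw [pvReplace_eq_sub, pvReplace_eq_sub]
  induction l with
  | nil => simp [pvSub, pvExpand, pvEsc]
  | cons c t ih =>
      by_cases hc : c = '%'
      · subst hc; simp_all [pvSub, pvEsc]
      · by_cases hq : c = '?'
        · subst hq; simp_all [pvSub, pvEsc]
        · simp_all [pvSub, pvEsc]

theorem pvExpand_cons (c : Char) (l : List Char) :
    pvExpand (c :: l) = (if c = '%' then ['%', '%'] else [c]) ++ pvExpand l := by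
  simp [pvExpand, pvSub]

theorem pvExpand_append (l₁ l₂ : List Char) :
    pvExpand (l₁ ++ l₂) = pvExpand l₁ ++ pvExpand l₂ := by
  simp [pvExpand, pvSub]

-- one-step unfolding lemmas for A's scan
theorem pyAScan_nil (st : Option Char) : pyAScan st [] = [] := by
  cases st <;> rw [pyAScan.eq_def]

theorem pyAScan_none_cons (c : Char) (r : List Char) :
    pyAScan none (c :: r) =
      if c = '\'' ∨ c = '"' then c :: pyAScan (some c) r
      else if c = '?' then '%' :: 's' :: pyAScan none r
      else c :: pyAScan none r := by
  rw [pyAScan.eq_def]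

theorem pyAScan_some_ne (q c : Char) (r : List Char) (h : ¬ c = q) :
    pyAScan (some q) (c :: r) = c :: pyAScan (some q) r := by
  rw [pyAScan.eq_def]; simp [h]

theorem pyAScan_some_eq_nil (q : Char) :
    pyAScan (some q) [q] = q :: pyAScan none [] := by
  rw [pyAScan.eq_def]; simp

theorem pyAScan_some_eq_cons (q c2 : Char) (r2 : List Char) :
    pyAScan (some q) (q :: c2 :: r2) =
      if c2 = q then q :: c2 :: pyAScan (some q) r2
      else q :: pyAScan none (c2 :: r2) := by
  rw [pyAScan.eq_def]; simp

-- find on a singleton needle: success gives a first occurrence decomposition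
theorem pvFind_decomp (s : List Char) (q : Char) (h : ¬ PySem.Chars.find s [q] = -1) :
    s.drop (PySem.Chars.find s [q]).toNat = q :: s.drop ((PySem.Chars.find s [q]).toNat + 1) ∧
    q ∉ s.take (PySem.Chars.find s [q]).toNat := by
  obtain ⟨hge, hlt⟩ := pvFind_bounds s q h
  obtain ⟨hpre, hmin⟩ := PySem.Chars.find_spec (s := s) (sub := [q]) hge
  constructor
  · obtain ⟨r, hr⟩ := hpre
    have h1 : s.drop (PySem.Chars.find s [q]).toNat = q :: r := by rw [← hr]; rfl
    have h2 : s.drop ((PySem.Chars.find s [q]).toNat + 1) = r := by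
      rw [← List.tail_drop, h1]; rfl
    rw [h1, h2]
  · intro hq
    obtain ⟨i, hi, hgi⟩ := List.getElem_of_mem hq
    have hik : i < (PySem.Chars.find s [q]).toNat := by
      have := hi
      simp only [List.length_take] at this
      omega
    have his : i < s.length := by omega
    refine hmin i hik ⟨s.drop (i + 1), ?_⟩
    rw [List.drop_eq_getElem_cons his]
    have hv : s[i] = q := by
      have := hgi
      simpa [List.getElem_take] using this
    simp [hv]

theorem pvFind_none (s : List Char) (q : Char) (h : PySem.Chars.find s [q] = -1) : q ∉ s := by
  intro hq
  have hinfix : [q] <:+: s := by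
    obtain ⟨l1, l2, hl⟩ := List.append_of_mem hq
    exact ⟨l1, l2, by rw [hl]; simp⟩
  exact (PySem.Chars.find_eq_neg_one_iff (s := s) (sub := [q])).mp h hinfix

-- helper step lemmas
theorem pvEsc_cons (c : Char) (l : List Char) :
    pvEsc (c :: l) = (if c = '%' then ['%', '%'] else if c = '?' then ['%', 's'] else [c]) ++ pvEsc l := by
  simp [pvEsc]

theorem pvA_none_plain (c : Char) (l : List Char)
    (h1 : ¬ (c = '\'' ∨ c = '"')) (h2 : ¬ c = '?') :
    pyAScan none (c :: l) = c :: pyAScan none l := by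
  rw [pyAScan_none_cons]; simp [h1, h2]

theorem pvA_none_qmark (l : List Char) :
    pyAScan none ('?' :: l) = '%' :: 's' :: pyAScan none l := by
  rw [pyAScan_none_cons]; simp

-- copy lemmas for A's scan
theorem pvCopy_none (u t : List Char) (h1 : '\'' ∉ u) (h2 : '"' ∉ u) :
    pyAScan none (pvExpand u ++ t) = pvEsc u ++ pyAScan none t := by
  induction u with
  | nil => simp [pvExpand, pvSub, pvEsc]
  | cons c u ih =>
      have hc1 : ¬ (c = '\'' ∨ c = '"') := by
        rintro (rfl | rfl)
        · exact h1 (List.mem_cons_self ..)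
        · exact h2 (List.mem_cons_self ..)
      have hu1 : '\'' ∉ u := fun hm => h1 (List.mem_cons_of_mem _ hm)
      have hu2 : '"' ∉ u := fun hm => h2 (List.mem_cons_of_mem _ hm)
      rw [pvExpand_cons, pvEsc_cons]
      by_cases hc : c = '%'
      · subst hc
        simp only [reduceIte, List.cons_append, List.nil_append, List.append_assoc]
        rw [pvA_none_plain '%' _ (by decide) (by decide),
          pvA_none_plain '%' _ (by decide) (by decide), ih hu1 hu2]
      · by_cases hq : c = '?'
        · subst hq
          simp only [if_neg hc, reduceIte, List.cons_append, List.nil_append, List.append_assoc]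
          rw [pvA_none_qmark, ih hu1 hu2]
        · simp only [if_neg hc, if_neg hq, List.cons_append, List.nil_append, List.append_assoc]
          rw [pvA_none_plain c _ hc1 hq, ih hu1 hu2]

theorem pvCopy_some (q : Char) (u t : List Char) (hq : q ≠ '%') (hu : q ∉ u) :
    pyAScan (some q) (pvExpand u ++ t) = pvExpand u ++ pyAScan (some q) t := by
  induction u with
  | nil => simp [pvExpand, pvSub]
  | cons c u ih =>
      have hcq : ¬ c = q := fun hh => hu (hh ▸ List.mem_cons_self ..)
      have hu' : q ∉ u := fun hm => hu (List.mem_cons_of_mem _ hm)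
      rw [pvExpand_cons]
      by_cases hc : c = '%'
      · subst hc
        simp only [reduceIte, List.cons_append, List.nil_append, List.append_assoc]
        rw [pyAScan_some_ne q '%' _ (fun hh => hq hh.symm),
          pyAScan_some_ne q '%' _ (fun hh => hq hh.symm), ih hu']
      · simp only [if_neg hc, List.cons_append, List.nil_append, List.append_assoc]
        rw [pyAScan_some_ne q c _ hcq, ih hu']

-- unfolding lemmas for pvTakeLiteral
theorem pvTakeLiteral_neg (q : Char) (s : List Char) (he : PySem.Chars.find s [q] = -1) :
    pvTakeLiteral q s = (s, []) := by
  rw [pvTakeLiteral]; simp [he]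

theorem pvTakeLiteral_peek (q : Char) (s : List Char) (he : ¬ PySem.Chars.find s [q] = -1)
    (hp : s[(PySem.Chars.find s [q]).toNat + 1]? = some q) :
    pvTakeLiteral q s =
      (s.take ((PySem.Chars.find s [q]).toNat + 2) ++ (pvTakeLiteral q (s.drop ((PySem.Chars.find s [q]).toNat + 2))).1,
       (pvTakeLiteral q (s.drop ((PySem.Chars.find s [q]).toNat + 2))).2) := by
  conv_lhs => rw [pvTakeLiteral]
  simp [he, hp]

theorem pvTakeLiteral_close (q : Char) (s : List Char) (he : ¬ PySem.Chars.find s [q] = -1)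
    (hp : ¬ s[(PySem.Chars.find s [q]).toNat + 1]? = some q) :
    pvTakeLiteral q s =
      (s.take ((PySem.Chars.find s [q]).toNat + 1), s.drop ((PySem.Chars.find s [q]).toNat + 1)) := by
  conv_lhs => rw [pvTakeLiteral]
  simp [he, hp]

-- membership in take: monotone helpers
theorem pvNotMem_take_of_le {c : Char} {s : List Char} {i j : Nat} (hij : i ≤ j)
    (h : c ∉ s.take j) : c ∉ s.take i := by
  intro hm
  apply h
  have heq : s.take i = (s.take j).take i := by
    rw [List.take_take, min_eq_left hij]
  exact List.take_subset _ _ (heq ▸ hm)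

theorem pvNotMem_take_of_not_mem {c : Char} {s : List Char} (i : Nat) (h : c ∉ s) :
    c ∉ s.take i := fun hm => h (List.take_subset _ _ hm)

-- the literal phase: A's in-string scanning = B's _take_literal chunk
theorem pvLit (n : Nat) : ∀ (s : List Char), s.length ≤ n → ∀ (q : Char), (q = '\'' ∨ q = '"') →
    pyAScan (some q) (pvExpand s) =
      pvExpand (pvTakeLiteral q s).1 ++ pyAScan none (pvExpand (pvTakeLiteral q s).2) := by
  induction n with
  | zero =>
      intro s hlen q hquote
      have hs : s = [] := List.length_eq_zero_iff.mp (Nat.le_zero.mp hlen)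
      subst hs
      have he : PySem.Chars.find ([] : List Char) [q] = -1 := by
        rw [PySem.Chars.find_eq_neg_one_iff]
        rintro ⟨l1, l2, hl⟩
        simp at hl
      rw [pvTakeLiteral_neg q [] he]
      simp [pvExpand, pvSub, pyAScan_nil]
  | succ n ih =>
      intro s hlen q hquote
      have hqp : ¬ q = '%' := by rcases hquote with rfl | rfl <;> decide
      by_cases he : PySem.Chars.find s [q] = -1
      · have hmem := pvFind_none s q he
        rw [pvTakeLiteral_neg q s he]
        simp only
        calc pyAScan (some q) (pvExpand s)
            = pyAScan (some q) (pvExpand s ++ []) := by simp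
          _ = pvExpand s ++ pyAScan (some q) [] := pvCopy_some q s [] hqp hmem
          _ = pvExpand s ++ pyAScan none (pvExpand []) := by
              simp [pyAScan_nil, pvExpand, pvSub]
      · obtain ⟨hd, htk⟩ := pvFind_decomp s q he
        obtain ⟨hge, hlt⟩ := pvFind_bounds s q he
        set k := (PySem.Chars.find s [q]).toNat with hk
        have hsplit : s = s.take k ++ q :: s.drop (k + 1) := by
          conv_lhs => rw [← List.take_append_drop k s, hd]
        have htklen : (s.take k).length = k := by
          simp [min_eq_left (le_of_lt hlt)]
        have lhs1 : pyAScan (some q) (pvExpand s) =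
            pvExpand (s.take k) ++ pyAScan (some q) (q :: pvExpand (s.drop (k + 1))) := by
          conv_lhs => rw [hsplit]
          rw [pvExpand_append, pvExpand_cons, if_neg hqp]
          simp only [List.singleton_append]
          rw [pvCopy_some q _ _ hqp htk]
        by_cases hpk : s[k + 1]? = some q
        · -- doubled quote: consume both and stay in the literal
          have hk1 : k + 1 < s.length := (List.getElem?_eq_some_iff.mp hpk).1
          have hgv : s[k + 1]'hk1 = q := (List.getElem?_eq_some_iff.mp hpk).2
          have hd2 : s.drop (k + 1) = q :: s.drop (k + 2) := by
            rw [List.drop_eq_getElem_cons hk1, hgv]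
          have hsplit2 : s = s.take k ++ q :: q :: s.drop (k + 2) := by
            conv_lhs => rw [hsplit, hd2]
          rw [pvTakeLiteral_peek q s he hpk]
          simp only
          have hrec := ih (s.drop (k + 2)) (by simp only [List.length_drop]; omega) q hquote
          have htake2 : s.take (k + 2) = s.take k ++ [q, q] := by
            conv_lhs => rw [hsplit2]
            rw [show k + 2 = (s.take k).length + 2 by rw [htklen], List.take_append]
            simp
          rw [lhs1, hd2, pvExpand_cons, if_neg hqp]
          simp only [List.singleton_append]
          rw [pyAScan_some_eq_cons, if_pos rfl, hrec]
          simp only [← hk]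
          rw [htake2, pvExpand_append, pvExpand_append]
          have hqq : pvExpand [q, q] = [q, q] := by simp [pvExpand, pvSub, hqp]
          rw [hqq]
          simp [List.append_assoc]
        · -- single quote: the literal closes here
          rw [pvTakeLiteral_close q s he hpk]
          simp only
          have htake1 : s.take (k + 1) = s.take k ++ [q] := by
            conv_lhs => rw [hsplit]
            rw [show k + 1 = (s.take k).length + 1 by rw [htklen], List.take_append]
            simp
          rw [lhs1]
          simp only [← hk]
          rw [htake1, pvExpand_append, pvExpand_cons, if_neg hqp]
          simp only [List.singleton_append, List.append_assoc]
          congr 1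
          cases hv : s.drop (k + 1) with
          | nil =>
              rw [pvExpand, pvSub]
              simp only [List.flatMap_nil]
              rw [pyAScan_some_eq_nil]
              simp [pyAScan_nil, pvExpand, pvSub]
          | cons c2 v2 =>
              have hc2 : ¬ c2 = q := by
                intro hcc
                apply hpk
                rw [← List.head?_drop, hv, hcc]
                rfl
              rw [pvExpand_cons]
              by_cases hc2p : c2 = '%'
              · subst hc2p
                simp only [reduceIte, List.cons_append, List.nil_append]
                rw [pyAScan_some_eq_cons, if_neg (show ¬ '%' = q from fun hh => hqp hh.symm)]
                rw [show pyAScan none ('%' :: '%' :: pvExpand v2) =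
                      pyAScan none (pvExpand ('%' :: v2)) by rw [pvExpand_cons]; simp]
                simp [pvExpand, pvSub]
              · simp only [if_neg hc2p, List.cons_append, List.nil_append]
                rw [pyAScan_some_eq_cons, if_neg hc2]
                rw [show (c2 :: pvExpand v2) = pvExpand (c2 :: v2) by rw [pvExpand_cons, if_neg hc2p]; simp]
                simp [pvExpand, pvSub]

-- characterisation of pvQuotePos on success
theorem pvQuotePos_spec (s : List Char) (h : ¬ pvQuotePos s = -1) :
    ∃ q, (q = '\'' ∨ q = '"') ∧ s.drop (pvQuotePos s).toNat = q :: s.drop ((pvQuotePos s).toNat + 1) ∧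
      '\'' ∉ s.take (pvQuotePos s).toNat ∧ '"' ∉ s.take (pvQuotePos s).toNat := by
  unfold pvQuotePos at h ⊢
  by_cases ha : PySem.Chars.find s ['\''] = -1
  · rw [if_pos ha] at h ⊢
    obtain ⟨hd, htk⟩ := pvFind_decomp s '"' h
    exact ⟨'"', Or.inr rfl, hd, pvNotMem_take_of_not_mem _ (pvFind_none s '\'' ha), htk⟩
  · rw [if_neg ha] at h ⊢
    by_cases hb : PySem.Chars.find s ['"'] = -1
    · rw [if_pos hb] at h ⊢
      obtain ⟨hd, htk⟩ := pvFind_decomp s '\'' ha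
      exact ⟨'\'', Or.inl rfl, hd, htk, pvNotMem_take_of_not_mem _ (pvFind_none s '"' hb)⟩
    · rw [if_neg hb] at h ⊢
      have h1 := pvFind_bounds s '\'' ha
      have h2 := pvFind_bounds s '"' hb
      rcases min_cases (PySem.Chars.find s ['\'']) (PySem.Chars.find s ['"']) with ⟨hm, hle⟩ | ⟨hm, hle⟩ <;>
        rw [hm]
      · obtain ⟨hd, htk⟩ := pvFind_decomp s '\'' ha
        obtain ⟨_, htk2⟩ := pvFind_decomp s '"' hb
        exact ⟨'\'', Or.inl rfl, hd, htk, pvNotMem_take_of_le (Int.toNat_le_toNat hle) htk2⟩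
      · obtain ⟨hd, htk⟩ := pvFind_decomp s '"' hb
        obtain ⟨_, htk2⟩ := pvFind_decomp s '\'' ha
        exact ⟨'"', Or.inr rfl, hd, pvNotMem_take_of_le (Int.toNat_le_toNat (le_of_lt hle)) htk2, htk⟩

theorem pvQuotePos_none (s : List Char) (h : pvQuotePos s = -1) : '\'' ∉ s ∧ '"' ∉ s := by
  unfold pvQuotePos at h
  by_cases ha : PySem.Chars.find s ['\''] = -1
  · rw [if_pos ha] at h
    exact ⟨pvFind_none s '\'' ha, pvFind_none s '"' h⟩
  · rw [if_neg ha] at h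
    by_cases hb : PySem.Chars.find s ['"'] = -1
    · rw [if_pos hb] at h
      exact absurd h ha
    · rw [if_neg hb] at h
      have h1 := pvFind_bounds s '\'' ha
      have h2 := pvFind_bounds s '"' hb
      have := le_min h1.1 h2.1
      rw [h] at this
      omega

-- the whole scan: A on the %-expanded string = B's chunked pass on the original
theorem pvMain (n : Nat) : ∀ (s : List Char), s.length ≤ n →
    pyAScan none (pvExpand s) = bMain s := by
  induction n with
  | zero =>
      intro s hlen
      have hs : s = [] := List.length_eq_zero_iff.mp (Nat.le_zero.mp hlen)
      subst hs
      have hq : pvQuotePos [] = -1 := by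
        have h1 : '\'' ∉ ([] : List Char) := by simp
        by_contra hne
        obtain ⟨q, _, hd, _⟩ := pvQuotePos_spec [] hne
        simp at hd
      rw [bMain, dif_pos hq]
      simp [pvExpand, pvSub, pyAScan_nil, pvEscOut_eq, pvEsc]
  | succ n ih =>
      intro s hlen
      by_cases hj : pvQuotePos s = -1
      · obtain ⟨h1, h2⟩ := pvQuotePos_none s hj
        rw [bMain, dif_pos hj, pvEscOut_eq]
        calc pyAScan none (pvExpand s)
            = pyAScan none (pvExpand s ++ []) := by simp
          _ = pvEsc s ++ pyAScan none [] := pvCopy_none s [] h1 h2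
          _ = pvEsc s := by simp [pyAScan_nil]
      · obtain ⟨q, hquote, hd, hq1, hq2⟩ := pvQuotePos_spec s hj
        obtain ⟨hge, hlt⟩ := pvQuotePos_bounds s hj
        have hqp : ¬ q = '%' := by rcases hquote with rfl | rfl <;> decide
        set k := (pvQuotePos s).toNat with hk
        have hget : PySem.List.pyGet? s (pvQuotePos s) = some q := by
          rw [← Int.toNat_of_nonneg hge, PySem.List.pyGet?_natCast]
          rw [← hk, ← List.head?_drop, hd]
          rfl
        have hsplit : s = s.take k ++ q :: s.drop (k + 1) := by
          conv_lhs => rw [← List.take_append_drop k s, hd]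
        rw [bMain, dif_neg hj, hget]
        simp only
        have hrest := pvTakeLiteral_rest_le q (s.drop (k + 1))
        simp only [List.length_drop] at hrest
        have hbrec := ih (pvTakeLiteral q (s.drop (k + 1))).2 (by omega)
        calc pyAScan none (pvExpand s)
            = pyAScan none (pvExpand (s.take k) ++ (q :: pvExpand (s.drop (k + 1)))) := by
              conv_lhs => rw [hsplit]
              rw [pvExpand_append, pvExpand_cons, if_neg hqp]
              simp
          _ = pvEsc (s.take k) ++ pyAScan none (q :: pvExpand (s.drop (k + 1))) :=
              pvCopy_none _ _ hq1 hq2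
          _ = pvEsc (s.take k) ++ q :: pyAScan (some q) (pvExpand (s.drop (k + 1))) := by
              rw [pyAScan_none_cons, if_pos hquote]
          _ = _ := by
              rw [pvLit (s.drop (k + 1)).length _ le_rfl q hquote, hbrec,
                pvEscOut_eq, pvReplace_eq_sub]
              rw [show pvSub '%' ['%', '%'] (q :: (pvTakeLiteral q (s.drop (k + 1))).1) =
                    pvExpand (q :: (pvTakeLiteral q (s.drop (k + 1))).1) from rfl]
              rw [pvExpand_cons, if_neg hqp]
              simp only [← hk]
              simp [List.append_assoc]

-- ===== VERDICT (by name: the statement is the Claim_ definition above) =====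
theorem translate_placeholders_py_spec : Claim_equal_translate_placeholders_py := by
  intro sql _
  unfold Spec_translate_placeholders_py translate_placeholders_py translate_placeholders_py_alt
  show String.ofList (pyAScan none (PySem.Str.replace sql "%" "%%").toList) = _
  rw [PySem.Str.toList_replace]
  rw [show ("%".toList) = ['%'] from rfl, show ("%%".toList) = ['%','%'] from rfl,
    pvReplace_eq_sub]
  rw [show pvSub '%' ['%','%'] sql.toList = pvExpand sql.toList from rfl,
    pvMain sql.toList.length sql.toList le_rfl]
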